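-- pv_equiv track=rewrite | github.com/junwson9/algorithm | 프로그래머스/1/92334. 신고 결과 받기/신고 결과 받기.py | solution
-- ===== SOURCE A (Python) =====
-- from collections import defaultdict
--
-- def solution(id_list, report, k):
--     answer = []
--     report = list(set(report))
--     usdict = defaultdict(set)
--     numdict = defaultdict(int)
--
--     for i in range(len(report)):
--         ke,v = report[i].split()
--         usdict[ke].add(v)
--         numdict[v] += 1
--
--
--     for name in id_list:
--         rlt = 0
--         for nm in usdict[name]:
--             if numdict[nm] >= k:
--                 rlt += 1
--         answer.append(rlt)
--
--
--
--
--
--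
--     return answer
-- ===== SOURCE B (Python) =====
-- def solution(id_list, report, k):
--     # first flat pass over deduped reports: how often each user was reported, and the distinct (reporter, reported) pairs
--     count = {}
--     pairs = set()
--     for r in set(report):
--         a, b = r.split()
--         pairs.add((a, b))
--         count[b] = count.get(b, 0) + 1
--     # second flat pass: credit each reporter once per banned reportee
--     result = {}
--     for a, b in pairs:
--         if count[b] >= k:
--             result[a] = result.get(a, 0) + 1
--     return [result.get(i, 0) for i in id_list]
-- ===== Notes on version B (the rewrite author's own statement) =====
-- stated objective: alternative
-- what changed: Replaces A's reporter-to-set-of-reported map and per-id nested scan with two flat passes over the deduped reports (a reported-count map plus a deduped (reporter,reported) pair set, then one accumulation pass crediting reporters into a result dict) and a single lookup per id.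
import Mathlib
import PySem

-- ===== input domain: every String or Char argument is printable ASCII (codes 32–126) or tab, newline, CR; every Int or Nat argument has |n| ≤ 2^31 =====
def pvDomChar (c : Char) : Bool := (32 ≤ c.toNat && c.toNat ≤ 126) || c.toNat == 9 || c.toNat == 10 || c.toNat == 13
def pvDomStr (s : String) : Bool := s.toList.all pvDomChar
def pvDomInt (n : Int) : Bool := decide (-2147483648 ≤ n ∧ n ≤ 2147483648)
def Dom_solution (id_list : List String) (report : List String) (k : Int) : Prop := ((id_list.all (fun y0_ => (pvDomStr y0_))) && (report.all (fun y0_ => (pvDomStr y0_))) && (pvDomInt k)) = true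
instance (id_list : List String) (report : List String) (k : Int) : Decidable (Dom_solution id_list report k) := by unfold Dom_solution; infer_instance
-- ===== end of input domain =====

-- B replaces A's reporter→set map and per-id nested scan with two flat passes over the
-- deduped reports (count map + pair set, then a result dict) and a lookup per id (alternative decomposition).

-- models Python's `ke, v = s.split()` unpacking; Pre_ guarantees exactly two tokens
def splitPair (s : String) : String × String :=
  match PySem.Str.split₀ s with
  | [a, b] => (a, b)
  | _ => ("", "")

-- ===== PORT A =====
def solution (id_list : List String) (report : List String) (k : Int) : List Int :=
  let report' := PySem.Set.ofList report
  let dicts := (PySem.List.pyRange 0 (PySem.List.len report')).foldl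
    (fun (st : PySem.Dict String (PySem.Set String) × PySem.Dict String Int) i =>
      let p := splitPair (PySem.List.pyGetD report' i "")
      (st.1.modify p.1 PySem.Set.empty (fun s => PySem.Set.add s p.2),
       st.2.modify p.2 0 (fun n => n + 1)))
    (PySem.Dict.empty, PySem.Dict.empty)
  id_list.foldl
    (fun answer name =>
      answer ++ [(dicts.1.getD name PySem.Set.empty).foldl
        (fun rlt nm => if dicts.2.getD nm 0 ≥ k then rlt + 1 else rlt) (0 : Int)])
    []

-- ===== PORT B =====
def solution_alt (id_list : List String) (report : List String) (k : Int) : List Int :=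
  let st := (PySem.Set.ofList report).foldl
    (fun (st : PySem.Set (String × String) × PySem.Dict String Int) r =>
      let p := splitPair r
      (PySem.Set.add st.1 p, st.2.insert p.2 (st.2.getD p.2 0 + 1)))
    (PySem.Set.empty, PySem.Dict.empty)
  let result := st.1.foldl
    (fun (res : PySem.Dict String Int) p =>
      if st.2.getD p.2 0 ≥ k then res.insert p.1 (res.getD p.1 0 + 1) else res)
    PySem.Dict.empty
  id_list.map (fun i => result.getD i 0)

-- ===== PRECONDITION & SPEC =====
-- Pre_ excludes exactly the inputs where Python A raises ValueError: a report string
-- whose whitespace split does not have exactly two tokens (B raises there as well).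
def Pre_solution (id_list : List String) (report : List String) (k : Int) : Prop :=
  ∀ r ∈ report, (PySem.Str.split₀ r).length = 2
instance (id_list : List String) (report : List String) (k : Int) : Decidable (Pre_solution id_list report k) := by unfold Pre_solution; infer_instance

def pvWitness_solution : List String × List String × Int := (["alice", "bob"], ["alice bob", "bob alice"], 1)

def Spec_solution (id_list : List String) (report : List String) (k : Int) (out : List Int) : Prop := out = solution_alt id_list report k
instance (id_list : List String) (report : List String) (k : Int) (out : List Int) : Decidable (Spec_solution id_list report k out) := by unfold Spec_solution; infer_instance

-- ===== CLAIM (what is proved, stated in full; the proofs are below) =====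
def Claim_equal_solution : Prop := ∀ (id_list : List String) (report : List String) (k : Int), Dom_solution id_list report k → Pre_solution id_list report k → Spec_solution id_list report k (solution id_list report k)

-- ===== LEMMAS AND PROOFS =====

-- A's usdict lookup: grouping fold, read back at one key
lemma usdict_getD (P : List (String × String)) (d : PySem.Dict String (PySem.Set String)) (name : String) :
    (P.foldl (fun d p => d.modify p.1 PySem.Set.empty (fun s => PySem.Set.add s p.2)) d).getD name PySem.Set.empty
    = ((P.filter (fun p => p.1 == name)).map Prod.snd).foldl PySem.Set.add (d.getD name PySem.Set.empty) := by
  induction P generalizing d with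
  | nil => simp
  | cons p P ih =>
    simp only [List.foldl_cons, List.filter_cons]
    by_cases h : p.1 = name
    · rw [ih, h, PySem.Dict.getD_modify_self]
      simp
    · have hne : name ≠ p.1 := fun hh => h hh.symm
      rw [ih, PySem.Dict.getD_modify_of_ne _ _ _ hne]
      simp [h]

-- deduping the reported users of one reporter = deduping the pairs, then projecting
lemma ofList_filter_map_snd (P : List (String × String)) (name : String) :
    PySem.Set.ofList ((P.filter (fun p => p.1 == name)).map Prod.snd)
    = ((PySem.Set.ofList P).filter (fun p => p.1 == name)).map Prod.snd := by
  induction P using List.reverseRecOn with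
  | nil => rfl
  | append_singleton P p ih =>
    rw [PySem.Set.ofList_eq_foldl, PySem.Set.ofList_eq_foldl (P ++ [p]), List.filter_append,
        List.map_append, List.foldl_append, List.foldl_append, ← PySem.Set.ofList_eq_foldl,
        ← PySem.Set.ofList_eq_foldl]
    by_cases hp : p.1 = name
    · simp only [List.filter_cons, List.filter_nil, hp, beq_self_eq_true, if_true, List.map_cons,
        List.map_nil, List.foldl_cons, List.foldl_nil]
      by_cases hmem : p ∈ PySem.Set.ofList P
      · have hmemP : p ∈ P := (PySem.Set.mem_ofList P p).mp hmem
        have h2 : p.2 ∈ (P.filter (fun q => q.1 == name)).map Prod.snd :=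
          List.mem_map_of_mem (List.mem_filter.mpr ⟨hmemP, by simp [hp]⟩)
        have h2' : p.2 ∈ PySem.Set.ofList ((P.filter (fun q => q.1 == name)).map Prod.snd) :=
          (PySem.Set.mem_ofList _ _).mpr h2
        rw [show (PySem.Set.ofList P).add p = PySem.Set.ofList P by
              simp [PySem.Set.add, PySem.Set.contains, hmem],
            show (PySem.Set.ofList ((P.filter (fun q => q.1 == name)).map Prod.snd)).add p.2
               = PySem.Set.ofList ((P.filter (fun q => q.1 == name)).map Prod.snd) by
              simp [PySem.Set.add, PySem.Set.contains, h2'],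
            ih]
      · have hmemP : p ∉ P := fun h => hmem ((PySem.Set.mem_ofList P p).mpr h)
        have h2 : p.2 ∉ PySem.Set.ofList ((P.filter (fun q => q.1 == name)).map Prod.snd) := by
          intro h
          rcases List.mem_map.mp ((PySem.Set.mem_ofList _ _).mp h) with ⟨q, hq, hsnd⟩
          rcases List.mem_filter.mp hq with ⟨hqP, hq1⟩
          have hqp : q = p := by
            have h1 : q.1 = name := by simpa using hq1
            exact Prod.ext (by rw [h1, hp]) hsnd
          exact hmemP (hqp ▸ hqP)
        rw [show (PySem.Set.ofList P).add p = PySem.Set.ofList P ++ [p] by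
              simp [PySem.Set.add, PySem.Set.contains, hmem],
            show (PySem.Set.ofList ((P.filter (fun q => q.1 == name)).map Prod.snd)).add p.2
               = PySem.Set.ofList ((P.filter (fun q => q.1 == name)).map Prod.snd) ++ [p.2] by
              simp [PySem.Set.add, PySem.Set.contains, h2],
            ih, List.filter_append, List.map_append]
        simp [hp]
    · have hp' : (p.1 == name) = false := by simp [hp]
      simp only [List.filter_cons, List.filter_nil, hp', Bool.false_eq_true, if_false,
        List.map_nil, List.foldl_nil, List.foldl_cons]
      by_cases hmem : p ∈ PySem.Set.ofList P
      · rw [show (PySem.Set.ofList P).add p = PySem.Set.ofList P by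
              simp [PySem.Set.add, PySem.Set.contains, hmem], ih]
      · rw [show (PySem.Set.ofList P).add p = PySem.Set.ofList P ++ [p] by
              simp [PySem.Set.add, PySem.Set.contains, hmem], ih, List.filter_append]
        simp [hp']

-- one id: A's inner scan over its reported-set = B's result-dict entry
lemma per_name (P : List (String × String)) (k : Int) (name : String) :
    ((P.foldl (fun d p => d.modify p.1 PySem.Set.empty (fun s => PySem.Set.add s p.2))
        PySem.Dict.empty).getD name PySem.Set.empty).foldl
      (fun rlt nm => if (PySem.Dict.counter (P.map Prod.snd)).getD nm 0 ≥ k then rlt + 1 else rlt) (0 : Int)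
    = ((PySem.Set.ofList P).foldl
        (fun (res : PySem.Dict String Int) p =>
          if (PySem.Dict.counter (P.map Prod.snd)).getD p.2 0 ≥ k then res.insert p.1 (res.getD p.1 0 + 1) else res)
        PySem.Dict.empty).getD name 0 := by
  rw [PySem.List.foldl_ite_add_one, usdict_getD]
  have hempty : (PySem.Dict.empty : PySem.Dict String (PySem.Set String)).getD name PySem.Set.empty
      = PySem.Set.empty := rfl
  rw [hempty, show (PySem.Set.empty : PySem.Set String) = [] from rfl, ← PySem.Set.ofList_eq_foldl,
      ofList_filter_map_snd]
  rw [PySem.List.foldl_ite_eq_foldl_filter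
        (p := fun p : String × String => (PySem.Dict.counter (P.map Prod.snd)).getD p.2 0 ≥ k),
      ← List.foldl_map (f := Prod.fst)
        (g := fun (res : PySem.Dict String Int) x => res.insert x (res.getD x 0 + 1)),
      PySem.Dict.foldl_insert_getD_add_one_eq_counter, PySem.Dict.getD_counter,
      List.count_eq_countP, List.countP_map, List.countP_map, List.countP_filter, List.countP_filter]
  rw [zero_add]
  congr 1
  apply List.countP_congr
  intro p _
  simp only [Function.comp]
  constructor <;> · intro h; simp_all

-- ===== VERDICT (by name: the statement is the Claim_ definition above) =====
theorem solution_spec : Claim_equal_solution := by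
  intro id_list report k _ _
  unfold Spec_solution solution solution_alt
  simp only
  rw [PySem.List.foldl_pyRange_pyGetD (PySem.Set.ofList report) ""
        (fun (st : PySem.Dict String (PySem.Set String) × PySem.Dict String Int) r =>
          (st.1.modify (splitPair r).1 PySem.Set.empty (fun s => PySem.Set.add s (splitPair r).2),
           st.2.modify (splitPair r).2 0 (fun n => n + 1)))
        (PySem.Dict.empty, PySem.Dict.empty) (le_refl 0), Int.toNat_zero, List.drop_zero]
  rw [PySem.List.foldl_prod_mk
        (f := fun (d : PySem.Dict String (PySem.Set String)) r =>
          d.modify (splitPair r).1 PySem.Set.empty (fun s => PySem.Set.add s (splitPair r).2))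
        (g := fun (d : PySem.Dict String Int) r => d.modify (splitPair r).2 0 (fun n => n + 1)),
      PySem.List.foldl_prod_mk
        (f := fun (s : PySem.Set (String × String)) r => PySem.Set.add s (splitPair r))
        (g := fun (d : PySem.Dict String Int) r => d.insert (splitPair r).2 (d.getD (splitPair r).2 0 + 1))]
  simp only
  rw [PySem.List.foldl_append_singleton_eq_map, List.nil_append]
  -- rewrite every fold over the deduped report strings as a fold over the split pairs P
  rw [← List.foldl_map (f := splitPair)
        (g := fun (d : PySem.Dict String (PySem.Set String)) p =>
          d.modify p.1 PySem.Set.empty (fun s => PySem.Set.add s p.2)),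
      ← List.foldl_map (f := splitPair)
        (g := fun (d : PySem.Dict String Int) p => d.modify p.2 0 (fun n => n + 1)),
      ← List.foldl_map (f := splitPair)
        (g := fun (s : PySem.Set (String × String)) p => PySem.Set.add s p),
      ← List.foldl_map (f := splitPair)
        (g := fun (d : PySem.Dict String Int) p => d.insert p.2 (d.getD p.2 0 + 1)),
      ← List.foldl_map (f := Prod.snd)
        (g := fun (d : PySem.Dict String Int) x => d.modify x 0 (fun n => n + 1)),
      ← List.foldl_map (f := Prod.snd)
        (g := fun (d : PySem.Dict String Int) x => d.insert x (d.getD x 0 + 1)),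
      ← PySem.Dict.counter_eq_foldl, PySem.Dict.foldl_insert_getD_add_one_eq_counter]
  apply List.map_congr_left
  intro name _
  exact per_name ((PySem.Set.ofList report).map splitPair) k name
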